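-- pv_equiv track=rewrite | github.com/Sheryl-Mathew/Recurrent-classifier-approach-using-Exact-imitation-and-DAgger-algorithms-for-sequence-labelling | Text2Speech_RGS2.py | possibleCombinationsOfGivenWordForNPairing
-- ===== SOURCE A (Python) =====
-- def possibleCombinationsOfGivenWordForNPairing(word_array, n):
--     word = ''.join(word_array)
--     #Take the relevant substrings
--     word_substrings = []
--
--     if n==2:
--         k = 1
--     elif n==3:
--         k = 2
--     else:
--         k = 3
--
--     for i in range(n+k):
--         string = word[i:len(word)]
--         if i%2 == 0:
--             word_substrings.append(string)
--
--     #Split a substring into individual characters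
--     word_substrings_character = []
--     for j in range(len(word_substrings)):
--         split_words =  [word_substrings[j][i:i+2] for i in range(0, len(word_substrings[j]), 2)]
--         word_substrings_character.append(split_words)
--
--     #combine all the elements in ith index
--     combination_array = list(zip(*word_substrings_character))
--     possible_combinations = [''.join(combination_array[i]) for i in range(len(combination_array))]
--     return possible_combinations
-- ===== SOURCE B (Python) =====
-- def possibleCombinationsOfGivenWordForNPairing(word_array, n):
--     word = ''.join(word_array)
--     k = 1 if n == 2 else 2 if n == 3 else 3
--     offsets = [i for i in range(n + k) if i % 2 == 0]
--     if not offsets: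
--         return []
--     # zip truncates to the shortest chunk list, i.e. the one of the largest offset
--     cols = max(0, (len(word) - offsets[-1] + 1) // 2)
--     return [''.join(word[o + 2 * t:o + 2 * t + 2] for o in offsets)
--             for t in range(cols)]
-- ===== Notes on version B (the rewrite author's own statement) =====
-- stated objective: simpler
-- what changed: B computes the even start offsets, derives the output column count from the largest offset (whose chunk list is shortest and so governs zip's truncation), and builds each result row directly as the joined 2-char slices word[o+2t:o+2t+2], eliminating A's materialized suffix substrings, the per-substring chunk lists and the zip(*) transpose.
import Mathlib
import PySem

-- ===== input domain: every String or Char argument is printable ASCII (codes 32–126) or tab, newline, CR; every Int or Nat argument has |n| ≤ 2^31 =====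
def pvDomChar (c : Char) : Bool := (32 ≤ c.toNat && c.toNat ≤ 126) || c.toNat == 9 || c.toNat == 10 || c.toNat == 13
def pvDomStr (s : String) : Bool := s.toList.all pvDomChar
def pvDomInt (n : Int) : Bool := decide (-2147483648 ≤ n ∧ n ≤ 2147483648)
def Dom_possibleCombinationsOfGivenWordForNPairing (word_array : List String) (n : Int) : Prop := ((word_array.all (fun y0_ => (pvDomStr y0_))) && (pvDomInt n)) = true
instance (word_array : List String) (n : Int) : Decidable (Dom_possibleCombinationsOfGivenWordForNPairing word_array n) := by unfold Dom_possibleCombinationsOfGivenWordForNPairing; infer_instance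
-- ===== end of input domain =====

-- B builds the result rows directly (column count derived from the largest offset), replacing A's
-- materialized suffix substrings, per-substring chunk lists and zip(*) transpose: a simpler decomposition.

-- ===== PORT A =====
-- zip(*xss): transpose truncating to the shortest list; fuel = length of the first list
-- (enough: zip stops no later than the first iterator's exhaustion).

def pvHeadsTails {α : Type} : List (List α) → Option (List α × List (List α))
  | [] => some ([], [])
  | [] :: _ => none
  | (a :: l) :: rest =>
    match pvHeadsTails rest with
    | none => none
    | some (hs, ts) => some (a :: hs, l :: ts)

def pvZipStarF {α : Type} : Nat → List (List α) → List (List α)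
  | 0, _ => []
  | f+1, xss =>
    match pvHeadsTails xss with
    | none => []
    | some (hs, ts) => hs :: pvZipStarF f ts

def pvZipStar {α : Type} : List (List α) → List (List α)
  | [] => []
  | x :: xss => pvZipStarF x.length (x :: xss)

def possibleCombinationsOfGivenWordForNPairing (word_array : List String) (n : Int) : List String :=
  let word : List Char := (word_array.map String.toList).flatten
  let k : Int := if n == 2 then 1 else if n == 3 then 2 else 3
  let word_substrings : List (List Char) :=
    (PySem.List.pyRange 0 (n + k)).foldl
      (fun acc i => if i % 2 == 0 then acc ++ [PySem.List.slice word (some i) (some (word.length : Int))] else acc) []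
  let word_substrings_character : List (List (List Char)) :=
    (PySem.List.pyRange 0 (word_substrings.length : Int)).foldl
      (fun acc j =>
        let s := PySem.List.pyGetD word_substrings j []
        acc ++ [(PySem.List.pyRange 0 (s.length : Int) 2).map
                  (fun i => PySem.List.slice s (some i) (some (i + 2)))]) []
  let combination_array := pvZipStar word_substrings_character
  (PySem.List.pyRange 0 (combination_array.length : Int)).map
    (fun i => String.ofList (PySem.List.pyGetD combination_array i []).flatten)

-- ===== PORT B =====

def possibleCombinationsOfGivenWordForNPairing_alt (word_array : List String) (n : Int) : List String :=
  let word : List Char := (word_array.map String.toList).flatten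
  let k : Int := if n == 2 then 1 else if n == 3 then 2 else 3
  let offsets := (PySem.List.pyRange 0 (n + k)).filter (fun i => i % 2 == 0)
  if offsets.isEmpty then []
  else
    let last := offsets.getLast?.getD 0
    let cols := max 0 (PySem.Int.floordiv ((word.length : Int) - last + 1) 2)
    (PySem.List.pyRange 0 cols).map
      (fun t => String.ofList ((offsets.map
        (fun o => PySem.List.slice word (some (o + 2 * t)) (some (o + 2 * t + 2)))).flatten))

-- ===== PRECONDITION & SPEC =====
def Spec_possibleCombinationsOfGivenWordForNPairing (word_array : List String) (n : Int) (out : List String) : Prop := out = possibleCombinationsOfGivenWordForNPairing_alt word_array n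
instance (word_array : List String) (n : Int) (out : List String) : Decidable (Spec_possibleCombinationsOfGivenWordForNPairing word_array n out) := by unfold Spec_possibleCombinationsOfGivenWordForNPairing; infer_instance

-- ===== CLAIM (what is proved, stated in full; the proofs are below) =====
def Claim_equal_possibleCombinationsOfGivenWordForNPairing : Prop := ∀ (word_array : List String) (n : Int), Dom_possibleCombinationsOfGivenWordForNPairing word_array n → Spec_possibleCombinationsOfGivenWordForNPairing word_array n (possibleCombinationsOfGivenWordForNPairing word_array n)

-- ===== LEMMAS AND PROOFS =====

def pvChunks : List Char → List (List Char)
  | [] => []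
  | [a] => [[a]]
  | a :: b :: l => [a, b] :: pvChunks l

theorem pv_chunks_eq (s : List Char) :
    pvChunks s = (List.range ((s.length + 1)/2)).map (fun t => (s.drop (2*t)).take 2) := by
  induction s using pvChunks.induct with
  | case1 => rfl
  | case2 a => simp [pvChunks]
  | case3 a b l ih =>
    show [a, b] :: pvChunks l = _
    have h2 : ((a :: b :: l).length + 1)/2 = (l.length + 1)/2 + 1 := by simp; omega
    rw [h2, List.range_succ_eq_map, List.map_cons, List.map_map, ih]
    congr 1

theorem pv_chunkA_eq (s : List Char) :
    (PySem.List.pyRange 0 (s.length : Int) 2).map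
      (fun i => PySem.List.slice s (some i) (some (i + 2))) = pvChunks s := by
  rw [pv_chunks_eq, PySem.List.pyRange_of_pos 0 (s.length : Int) (by norm_num)]
  rcases Nat.eq_zero_or_pos s.length with h | h
  · simp [h]
  · rw [if_pos (by exact_mod_cast h)]
    have hc : (((s.length : Int) - 0 + 2 - 1) / 2).toNat = (s.length + 1)/2 := by omega
    rw [hc, List.map_map]
    apply List.map_congr_left
    intro t _
    simp only [Function.comp]
    have h1 : (0 : Int) + 2 * (t : Int) = ((2*t : Nat) : Int) := by push_cast; ring
    have h2 : (0 : Int) + 2 * (t : Int) + 2 = ((2*t+2 : Nat) : Int) := by push_cast; ring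
    rw [h1, show ((2*t : Nat) : Int) + 2 = ((2*t+2 : Nat) : Int) by push_cast; ring,
      PySem.List.slice_natCast]
    congr 1
    omega

theorem pv_headsTails_of_mem_nil {α : Type} (xss : List (List α)) (h : [] ∈ xss) :
    pvHeadsTails xss = none := by
  induction xss with
  | nil => simp at h
  | cons x rest ih =>
    cases x with
    | nil => rfl
    | cons a l =>
      have : [] ∈ rest := by simpa using h
      simp [pvHeadsTails, ih this]

theorem pv_headsTails_map_cons {α β : Type} (os : List β) (g : β → α) (h : β → List α) :
    pvHeadsTails (os.map (fun o => g o :: h o)) = some (os.map g, os.map (fun o => h o)) := by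
  induction os with
  | nil => rfl
  | cons o os ih => simp [pvHeadsTails, ih]

theorem pv_zipStarF_of_mem_nil {α : Type} (f : Nat) (xss : List (List α)) (h : [] ∈ xss) :
    pvZipStarF f xss = [] := by
  cases f with
  | zero => rfl
  | succ f => simp [pvZipStarF, pv_headsTails_of_mem_nil xss h]

theorem pv_chunks_cons (l : List Char) (hl : l ≠ []) :
    pvChunks l = l.take 2 :: pvChunks (l.drop 2) := by
  induction l using pvChunks.induct with
  | case1 => simp at hl
  | case2 a => rfl
  | case3 a b l ih => rfl

theorem pv_zip_main (word : List Char) :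
    ∀ (c f : Nat) (os : List Nat) (last : Nat),
      last ∈ os → (∀ o ∈ os, o ≤ last) →
      c = ((word.length - last) + 1)/2 → c ≤ f →
      pvZipStarF f (os.map (fun o => pvChunks (word.drop o)))
        = (List.range c).map (fun t => os.map (fun o => (word.drop (o + 2*t)).take 2)) := by
  intro c
  induction c with
  | zero =>
    intro f os last hmem hbd hc _
    have hL : word.length ≤ last := by omega
    have : ([] : List (List Char)) ∈ os.map (fun o => pvChunks (word.drop o)) := by
      refine List.mem_map.mpr ⟨last, hmem, ?_⟩
      rw [List.drop_eq_nil_iff.mpr hL]; rfl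
    simp [pv_zipStarF_of_mem_nil _ _ this]
  | succ c ih =>
    intro f os last hmem hbd hc hf
    cases f with
    | zero => omega
    | succ f =>
      have hlastL : last < word.length := by omega
      have hmap : os.map (fun o => pvChunks (word.drop o))
          = os.map (fun o => (word.drop o).take 2 :: pvChunks (word.drop (o + 2))) := by
        apply List.map_congr_left
        intro o ho
        have : word.drop o ≠ [] := by
          rw [ne_eq, List.drop_eq_nil_iff]
          have := hbd o ho; omega
        rw [pv_chunks_cons _ this, List.drop_drop]
      rw [hmap]
      simp only [pvZipStarF, pv_headsTails_map_cons]
      have hts : os.map (fun o => pvChunks (word.drop (o + 2)))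
          = (os.map (· + 2)).map (fun o => pvChunks (word.drop o)) := by
        rw [List.map_map]; rfl
      rw [hts, ih f (os.map (· + 2)) (last + 2)
            (List.mem_map.mpr ⟨last, hmem, rfl⟩)
            (by intro o ho; obtain ⟨o', ho', rfl⟩ := List.mem_map.mp ho
                have := hbd o' ho'; omega)
            (by omega) (by omega)]
      rw [List.range_succ_eq_map, List.map_cons, List.map_map]
      congr 1
      apply List.map_congr_left
      intro t _
      simp only [List.map_map, Function.comp_def]
      apply List.map_congr_left
      intro a _
      have h3 : a + 2 + 2 * t = a + 2 * (t + 1) := by ring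
      simp only [h3]

theorem pv_evens_eq (M : Nat) :
    (List.range M).filter (fun j => j % 2 == 0) = (List.range ((M+1)/2)).map (fun j => 2*j) := by
  induction M with
  | zero => rfl
  | succ M ih =>
    rw [List.range_succ, List.filter_append, ih]
    by_cases h : M % 2 = 0
    · have h2 : (M+1+1)/2 = (M+1)/2 + 1 := by omega
      rw [h2, List.range_succ, List.map_append]
      simp [h]
      omega
    · have h2 : (M+1+1)/2 = (M+1)/2 := by omega
      simp [h2, h]

theorem pv_offsets_eq (m : Int) (hm : 0 < m) :
    (PySem.List.pyRange 0 m).filter (fun i => i % 2 == 0)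
      = (List.range ((m.toNat + 1)/2)).map (fun j => ((2*j : Nat) : Int)) := by
  rw [PySem.List.pyRange_one, List.filter_map]
  have h1 : (m - 0).toNat = m.toNat := by omega
  rw [h1]
  have h2 : List.filter ((fun i => i % 2 == 0) ∘ fun k => (0 : Int) + ↑k) (List.range m.toNat)
      = List.filter (fun j => j % 2 == 0) (List.range m.toNat) := by
    apply List.filter_congr
    intro k _
    simp only [Function.comp, zero_add]
    cases h : (k % 2 == 0) with
    | true => simp only [beq_iff_eq] at h ⊢; omega
    | false => simp only [beq_eq_false_iff_ne, ne_eq] at h ⊢; omega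
  rw [h2, pv_evens_eq, List.map_map]
  apply List.map_congr_left
  intro j _
  simp

theorem pv_slice_full (word : List Char) (a : Nat) :
    PySem.List.slice word (some (a : Int)) (some (word.length : Int)) = word.drop a := by
  rw [PySem.List.slice_natCast, show word.length - a = (word.drop a).length by simp,
    List.take_length]

theorem pv_chars_eq (ws : List (List Char)) :
    (PySem.List.pyRange 0 (ws.length : Int)).foldl
      (fun acc j => acc ++ [(PySem.List.pyRange 0 ((PySem.List.pyGetD ws j []).length : Int) 2).map
          (fun i => PySem.List.slice (PySem.List.pyGetD ws j []) (some i) (some (i + 2)))]) []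
      = ws.map pvChunks := by
  rw [PySem.List.foldl_pyRange_zero_pyGetD' ws []
      (fun acc s => acc ++ [(PySem.List.pyRange 0 (s.length : Int) 2).map
        (fun i => PySem.List.slice s (some i) (some (i + 2)))]) [],
    PySem.List.foldl_append_singleton_eq_map, List.nil_append]
  exact List.map_congr_left (fun s _ => pv_chunkA_eq s)

theorem pv_map_idx' (xs : List (List (List Char))) :
    (PySem.List.pyRange 0 (xs.length : Int)).map
      (fun i => String.ofList (PySem.List.pyGetD xs i []).flatten)
      = xs.map (fun row => String.ofList row.flatten) := by
  have h : (fun i => String.ofList (PySem.List.pyGetD xs i []).flatten)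
      = (fun row => String.ofList row.flatten) ∘ (fun i => PySem.List.pyGetD xs i []) := rfl
  rw [h, ← List.map_map, PySem.List.map_pyGetD_pyRange_zero']

theorem pv_zipchars_eq (word : List Char) (q' : Nat) :
    pvZipStar ((List.range (q'+1)).map (fun j => pvChunks (word.drop (2*j))))
      = (List.range (((word.length - 2*q') + 1)/2)).map
          (fun t => (List.range (q'+1)).map (fun j => (word.drop (2*j + 2*t)).take 2)) := by
  have hchars : (List.range (q'+1)).map (fun j => pvChunks (word.drop (2*j)))
      = pvChunks word :: ((List.range q').map (fun j => pvChunks (word.drop (2*(j+1))))) := by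
    rw [List.range_succ_eq_map, List.map_cons, List.map_map]
    simp [Function.comp]
  have hcons : pvZipStar ((List.range (q'+1)).map (fun j => pvChunks (word.drop (2*j))))
      = pvZipStarF (pvChunks word).length ((List.range (q'+1)).map (fun j => pvChunks (word.drop (2*j)))) := by
    conv_lhs => rw [hchars]
    conv_rhs => rw [hchars]
    rfl
  rw [hcons]
  have hos : (List.range (q'+1)).map (fun j => pvChunks (word.drop (2*j)))
      = ((List.range (q'+1)).map (fun j => 2*j)).map (fun o => pvChunks (word.drop o)) := by
    rw [List.map_map]; rfl
  rw [hos, pv_zip_main word (((word.length - 2*q') + 1)/2) (pvChunks word).length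
        ((List.range (q'+1)).map (fun j => 2*j)) (2*q')
        (List.mem_map.mpr ⟨q', List.mem_range.mpr (Nat.lt_succ_self q'), rfl⟩)
        (by intro o ho
            obtain ⟨j, hj, rfl⟩ := List.mem_map.mp ho
            have := List.mem_range.mp hj; omega)
        rfl
        (by rw [pv_chunks_eq, List.length_map, List.length_range]; omega)]
  apply List.map_congr_left
  intro t _
  rw [List.map_map]
  rfl

theorem pv_spec : ∀ (word_array : List String) (n : Int),
    possibleCombinationsOfGivenWordForNPairing word_array n
      = possibleCombinationsOfGivenWordForNPairing_alt word_array n := by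
  intro wa n
  simp only [possibleCombinationsOfGivenWordForNPairing, possibleCombinationsOfGivenWordForNPairing_alt]
  generalize (wa.map String.toList).flatten = word
  generalize n + (if n == 2 then (1:Int) else if n == 3 then 2 else 3) = m
  by_cases hm : m ≤ 0
  · rw [PySem.List.pyRange_one_eq_nil hm]
    simp [pvZipStar]
  · have hm' : (0:Int) < m := by omega
    rw [PySem.List.foldl_append_if, List.nil_append, pv_offsets_eq m hm']
    obtain ⟨q', hq⟩ : ∃ q', (m.toNat + 1)/2 = q'+1 := ⟨(m.toNat + 1)/2 - 1, by omega⟩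
    rw [hq]
    simp only [List.map_map, Function.comp_def, pv_slice_full]
    rw [pv_chars_eq]
    simp only [List.map_map, Function.comp_def]
    rw [pv_zipchars_eq word q', pv_map_idx', List.map_map]
    have hemp : ((List.range (q'+1)).map (fun j => ((2*j : Nat) : Int))).isEmpty = false := by simp
    have hlast : ((List.range (q'+1)).map (fun j => ((2*j : Nat) : Int))).getLast?.getD 0
        = ((2*q' : Nat) : Int) := by
      rw [List.getLast?_map, List.range_succ, List.getLast?_concat]; rfl
    rw [hemp, hlast]
    simp only [Bool.false_eq_true, if_false]
    have hcols : max 0 (PySem.Int.floordiv ((word.length : Int) - ((2*q' : Nat) : Int) + 1) 2)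
        = (((word.length - 2*q') + 1)/2 : Nat) := by
      simp only [PySem.Int.floordiv]
      rw [Int.fdiv_eq_ediv]
      split_ifs <;> push_cast <;> omega
    rw [hcols, PySem.List.pyRange_one,
      show (((((word.length - 2*q') + 1)/2 : Nat) : Int) - 0).toNat = ((word.length - 2*q') + 1)/2 by omega,
      List.map_map]
    apply List.map_congr_left
    intro t _
    simp only [Function.comp_def]
    congr 1
    congr 1
    apply List.map_congr_left
    intro j _
    have e1 : ((2*j : Nat) : Int) + 2*((0:Int) + (t : Int)) = ((2*j + 2*t : Nat) : Int) := by
      push_cast; ring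
    have e2 : ((2*j + 2*t : Nat) : Int) + 2 = ((2*j + 2*t + 2 : Nat) : Int) := by
      push_cast; ring
    rw [e1, e2, PySem.List.slice_natCast]
    congr 1
    omega

-- ===== VERDICT (by name: the statement is the Claim_ definition above) =====
theorem possibleCombinationsOfGivenWordForNPairing_spec : Claim_equal_possibleCombinationsOfGivenWordForNPairing := by
  intro word_array n _
  exact pv_spec word_array n
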